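-- pv_equiv track=rewrite | github.com/romankurnovskii/leetcode-apps | solutions/3672/01.py | sumWeightedModes
-- ===== SOURCE A (Python) =====
-- from typing import List
--
-- def sumWeightedModes(nums: List[int]) -> int:
--     from collections import Counter
--
--     n = len(nums)
--     res = 0
--
--     for i in range(n):
--         for j in range(i, n):
--             subarray = nums[i : j + 1]
--             count = Counter(subarray)
--             max_freq = max(count.values()) if count else 0
--
--             for num, freq in count.items():
--                 if freq == max_freq:
--                     res += num * freq
--
--     return res
-- ===== SOURCE B (Python) =====
-- from typing import List
--
-- def sumWeightedModes(nums: List[int]) -> int: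
--     # O(n^2): for each start i, extend the subarray one element at a time,
--     # maintaining the frequency table, the current max frequency and the
--     # running sum of num*freq over all tied modes.
--     n = len(nums)
--     res = 0
--     for i in range(n):
--         freq = {}
--         max_freq = 0
--         mode_sum = 0
--         for j in range(i, n):
--             x = nums[j]
--             c = freq.get(x, 0) + 1
--             freq[x] = c
--             if c > max_freq:
--                 max_freq = c
--                 mode_sum = x * c
--             elif c == max_freq:
--                 mode_sum += x * c
--             res += mode_sum
--     return res
-- ===== Notes on version B (the rewrite author's own statement) =====
-- stated objective: faster
-- what changed: Instead of re-slicing each subarray and rebuilding a Counter from scratch (O(n^3)), B fixes the start index and extends the subarray one element at a time, incrementally maintaining the frequency table, the running maximum frequency and the sum of num*freq over tied modes.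
import Mathlib
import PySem

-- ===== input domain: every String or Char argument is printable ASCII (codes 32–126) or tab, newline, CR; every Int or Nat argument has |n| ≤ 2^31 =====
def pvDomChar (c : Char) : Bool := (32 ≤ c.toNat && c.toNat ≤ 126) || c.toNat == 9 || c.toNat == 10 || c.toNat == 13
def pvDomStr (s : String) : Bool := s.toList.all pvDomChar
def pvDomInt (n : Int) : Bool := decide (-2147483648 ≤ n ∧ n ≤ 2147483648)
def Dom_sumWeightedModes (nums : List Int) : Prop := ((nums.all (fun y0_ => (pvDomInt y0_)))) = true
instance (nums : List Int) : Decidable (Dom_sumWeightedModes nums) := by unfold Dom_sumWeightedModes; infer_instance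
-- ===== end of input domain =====

-- B re-implements A's O(n^3) slice-and-recount as an O(n^2) per-start incremental scan.

-- ===== PORT A =====
def sumWeightedModes (nums : List Int) : Int :=
  let n : Int := (nums.length : Int)
  (PySem.List.pyRange 0 n 1).foldl (fun res i =>
    (PySem.List.pyRange i n 1).foldl (fun res j =>
      let subarray := PySem.List.slice nums (some i) (some (j + 1))
      let count : PySem.Dict Int Int := PySem.Dict.counter subarray
      let max_freq : Int :=
        if count.size ≠ 0 then (PySem.List.max? count.values (fun v => v)).getD 0 else 0
      count.items.foldl (fun res p =>
        if p.2 == max_freq then res + p.1 * p.2 else res) res) res) 0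

-- ===== PORT B =====
def sumWeightedModes_alt (nums : List Int) : Int :=
  let n : Int := (nums.length : Int)
  (PySem.List.pyRange 0 n 1).foldl (fun res i =>
    let st := (PySem.List.pyRange i n 1).foldl
      (fun (st : PySem.Dict Int Int × Int × Int × Int) j =>
        let x := PySem.List.pyGetD nums j 0
        let c := st.1.getD x 0 + 1
        let freq := st.1.insert x c
        if c > st.2.1 then (freq, c, x * c, st.2.2.2 + x * c)
        else if c == st.2.1 then (freq, st.2.1, st.2.2.1 + x * c, st.2.2.2 + (st.2.2.1 + x * c))
        else (freq, st.2.1, st.2.2.1, st.2.2.2 + st.2.2.1))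
      (PySem.Dict.empty, 0, 0, res)
    st.2.2.2) 0

-- ===== PRECONDITION & SPEC =====
def Spec_sumWeightedModes (nums : List Int) (out : Int) : Prop := out = sumWeightedModes_alt nums
instance (nums : List Int) (out : Int) : Decidable (Spec_sumWeightedModes nums out) := by unfold Spec_sumWeightedModes; infer_instance

-- ===== CLAIM (what is proved, stated in full; the proofs are below) =====
def Claim_equal_sumWeightedModes : Prop := ∀ (nums : List Int), Dom_sumWeightedModes nums → Spec_sumWeightedModes nums (sumWeightedModes nums)

-- ===== LEMMAS AND PROOFS =====

-- count of k in t as an Int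
def pvCnt (t : List Int) (k : Int) : Int := (t.count k : Int)
-- max frequency (0 on the empty list)
def pvMF (t : List Int) : Int :=
  ((PySem.Set.ofList t).map (fun k => pvCnt t k)).foldl max 0
-- sum of k * count(k) over the tied modes
def pvWS (t : List Int) : Int :=
  ((PySem.Set.ofList t).map (fun k => if pvCnt t k = pvMF t then k * pvCnt t k else 0)).sum
-- sum of pvWS over all nonempty prefixes
def pvAW (t : List Int) : Int :=
  ((List.range t.length).map (fun k => pvWS (t.take (k + 1)))).sum
-- B's inner-loop step, on the element value
def pvBstep (st : PySem.Dict Int Int × Int × Int × Int) (x : Int) :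
    PySem.Dict Int Int × Int × Int × Int :=
  let c := st.1.getD x 0 + 1
  let freq := st.1.insert x c
  if c > st.2.1 then (freq, c, x * c, st.2.2.2 + x * c)
  else if c == st.2.1 then (freq, st.2.1, st.2.2.1 + x * c, st.2.2.2 + (st.2.2.1 + x * c))
  else (freq, st.2.1, st.2.2.1, st.2.2.2 + st.2.2.1)

theorem pvCnt_pos {t : List Int} {k : Int} (h : k ∈ t) : 1 ≤ pvCnt t k := by
  unfold pvCnt
  have := List.count_pos_iff.mpr h
  omega

theorem pvCnt_nonneg (t : List Int) (k : Int) : 0 ≤ pvCnt t k := by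
  unfold pvCnt; positivity

theorem pvMF_ub {t : List Int} {k : Int} (h : k ∈ t) : pvCnt t k ≤ pvMF t := by
  unfold pvMF
  exact (PySem.List.le_foldl_max _ 0).2 _ (List.mem_map_of_mem (by
    simpa [PySem.Set.mem_ofList] using h))

theorem pvMF_eq {t : List Int} {k : Int} (hk : k ∈ t)
    (hmax : ∀ j ∈ t, pvCnt t j ≤ pvCnt t k) : pvMF t = pvCnt t k := by
  have hub := pvMF_ub hk
  have hle : pvMF t ≤ pvCnt t k := by
    rcases PySem.List.foldl_max_mem ((PySem.Set.ofList t).map (fun j => pvCnt t j)) 0 with h | h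
    · unfold pvMF; rw [h]; exact le_trans (by norm_num) (pvCnt_pos hk)
    · rcases List.mem_map.mp h with ⟨j, hj, hjv⟩
      unfold pvMF
      rw [← hjv]
      exact hmax j (by simpa [PySem.Set.mem_ofList] using hj)
  omega

theorem pvMF_attained {t : List Int} (h : t ≠ []) : ∃ k ∈ t, pvCnt t k = pvMF t := by
  rcases PySem.List.foldl_max_mem ((PySem.Set.ofList t).map (fun j => pvCnt t j)) 0 with hm | hm
  · exfalso
    rcases List.exists_mem_of_ne_nil t h with ⟨a, ha⟩
    have h1 := pvCnt_pos ha
    have h2 := pvMF_ub ha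
    unfold pvMF at h2
    omega
  · rcases List.mem_map.mp hm with ⟨j, hj, hjv⟩
    exact ⟨j, by simpa [PySem.Set.mem_ofList] using hj, hjv⟩

theorem pvMF_one_le {t : List Int} (h : t ≠ []) : 1 ≤ pvMF t := by
  rcases pvMF_attained h with ⟨k, hk, hv⟩
  have := pvCnt_pos hk
  omega

theorem pvSumUpdate : ∀ (l : List Int), l.Nodup → ∀ x ∈ l, ∀ (f g : Int → Int),
    (∀ k ∈ l, k ≠ x → f k = g k) →
    (l.map f).sum = (l.map g).sum + (f x - g x) := by
  intro l
  induction l with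
  | nil => intro _ x hx; simp at hx
  | cons a l ih =>
    intro hnd x hx f g hfg
    rcases List.nodup_cons.mp hnd with ⟨hal, hndl⟩
    rcases List.mem_cons.mp hx with rfl | hxl
    · have : l.map f = l.map g := List.map_congr_left (fun k hk =>
        hfg k (List.mem_cons_of_mem _ hk) (fun he => hal (he ▸ hk)))
      simp [this]; ring
    · have hax : a ≠ x := fun he => hal (he ▸ hxl)
      have h1 := ih hndl x hxl f g (fun k hk hkx => hfg k (List.mem_cons_of_mem _ hk) hkx)
      simp [h1, hfg a (List.mem_cons_self ..) hax]; ring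

theorem pvCnt_append (t : List Int) (x k : Int) :
    pvCnt (t ++ [x]) k = pvCnt t k + (if k = x then 1 else 0) := by
  unfold pvCnt
  rcases eq_or_ne k x with rfl | h
  · simp
  · simp [List.count_append, List.count_singleton, h, Ne.symm h]

theorem pvMF_append (t : List Int) (x : Int) :
    pvMF (t ++ [x]) = max (pvMF t) (pvCnt t x + 1) := by
  have hx : x ∈ t ++ [x] := by simp
  have hcx : pvCnt (t ++ [x]) x = pvCnt t x + 1 := by rw [pvCnt_append]; simp
  have hother : ∀ j ∈ t, j ≠ x → pvCnt (t ++ [x]) j = pvCnt t j := by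
    intro j _ hj; rw [pvCnt_append]; simp [hj]
  by_cases hc : pvMF t ≤ pvCnt t x + 1
  · rw [max_eq_right hc, ← hcx]
    apply pvMF_eq hx
    intro j hj
    rcases eq_or_ne j x with rfl | hne
    · omega
    · have hjt : j ∈ t := by
        rcases List.mem_append.mp hj with h | h
        · exact h
        · simp at h; exact absurd h hne
      rw [hother j hjt hne, hcx]
      have := pvMF_ub hjt
      omega
  · push_neg at hc
    rw [max_eq_left (le_of_lt hc)]
    have ht : t ≠ [] := by
      intro h; subst h
      simp [pvMF] at hc
      have := pvCnt_nonneg [] x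
      omega
    rcases pvMF_attained ht with ⟨k, hk, hkv⟩
    have hkx : k ≠ x := by
      intro h; subst h; omega
    have hkv' : pvCnt (t ++ [x]) k = pvMF t := by rw [hother k hk hkx, hkv]
    rw [← hkv']
    apply pvMF_eq (List.mem_append_left _ hk)
    intro j hj
    rcases eq_or_ne j x with rfl | hne
    · rw [hcx, hkv']; omega
    · have hjt : j ∈ t := by
        rcases List.mem_append.mp hj with h | h
        · exact h
        · simp at h; exact absurd h hne
      rw [hother j hjt hne, hkv']
      exact pvMF_ub hjt

theorem pvWS_append (t : List Int) (x : Int) :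
    pvWS (t ++ [x]) =
      if pvMF t < pvCnt t x + 1 then x * (pvCnt t x + 1)
      else if pvCnt t x + 1 = pvMF t then pvWS t + x * (pvCnt t x + 1)
      else pvWS t := by
  have hMF := pvMF_append t x
  have hcx : pvCnt (t ++ [x]) x = pvCnt t x + 1 := by rw [pvCnt_append]; simp
  have hother : ∀ j, j ≠ x → pvCnt (t ++ [x]) j = pvCnt t j := by
    intro j hj; rw [pvCnt_append]; simp [hj]
  set c := pvCnt t x + 1 with hc
  set M := pvMF t with hM
  by_cases hmem : x ∈ t
  · -- S' = S
    have hS : PySem.Set.ofList (t ++ [x]) = PySem.Set.ofList t := by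
      rw [PySem.Set.ofList_append_singleton, PySem.Set.add_of_mem (by
        simpa [PySem.Set.mem_ofList] using hmem)]
    have hxS : x ∈ PySem.Set.ofList t := by simpa [PySem.Set.mem_ofList] using hmem
    have hcx1 : 1 ≤ pvCnt t x := pvCnt_pos hmem
    by_cases h1 : M < c
    · -- new strict max: only x contributes
      have hMF' : pvMF (t ++ [x]) = c := by rw [hMF]; omega
      rw [if_pos h1]
      unfold pvWS
      rw [hS, hMF']
      have := pvSumUpdate (PySem.Set.ofList t) (PySem.Set.nodup_ofList t) x hxS
        (fun k => if pvCnt (t ++ [x]) k = c then k * pvCnt (t ++ [x]) k else 0)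
        (fun _ => 0)
        (by
          intro k hk hkx
          beta_reduce
          rw [hother k hkx]
          have hkt : k ∈ t := by simpa [PySem.Set.mem_ofList] using hk
          have := pvMF_ub hkt
          rw [if_neg (by omega)])
      beta_reduce at this
      rw [this, hcx]
      simp [if_pos rfl]
    · push_neg at h1
      have hMF' : pvMF (t ++ [x]) = M := by rw [hMF]; omega
      have hM2 : 2 ≤ M := by omega
      have hsum := pvSumUpdate (PySem.Set.ofList t) (PySem.Set.nodup_ofList t) x hxS
        (fun k => if pvCnt (t ++ [x]) k = M then k * pvCnt (t ++ [x]) k else 0)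
        (fun k => if pvCnt t k = M then k * pvCnt t k else 0)
        (by intro k hk hkx; beta_reduce; rw [hother k hkx])
      beta_reduce at hsum
      unfold pvWS
      rw [hS, hMF', ← hM, hsum, hcx]
      have hgx : ¬ (pvCnt t x = M) := by omega
      rw [if_neg hgx]
      have hnlt : ¬ M < c := not_lt.mpr h1
      rw [if_neg hnlt]
      by_cases h2 : c = M
      · rw [if_pos h2, if_pos h2]; ring
      · rw [if_neg h2, if_neg h2]; ring
  · -- x is new: S' = S ++ [x], c = 1
    have hcnt0 : pvCnt t x = 0 := by
      unfold pvCnt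
      simp [List.count_eq_zero_of_not_mem hmem]
    have hc1 : c = 1 := by omega
    have hS : PySem.Set.ofList (t ++ [x]) = PySem.Set.ofList t ++ [x] := by
      rw [PySem.Set.ofList_append_singleton, PySem.Set.add_of_not_mem (by
        simpa [PySem.Set.mem_ofList] using hmem)]
    rcases eq_or_ne t [] with rfl | ht
    · have hM0 : M = 0 := by simp [hM, pvMF]
      rw [if_pos (by omega)]
      unfold pvWS
      rw [hS, hMF]
      simp [pvMF, hM0, hc1, hcx, pvCnt]
    · have hM1 : 1 ≤ M := pvMF_one_le ht
      have hMF' : pvMF (t ++ [x]) = M := by rw [hMF]; omega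
      have hSfx : ∀ k ∈ PySem.Set.ofList t,
          (if pvCnt (t ++ [x]) k = M then k * pvCnt (t ++ [x]) k else 0)
            = (if pvCnt t k = M then k * pvCnt t k else 0) := by
        intro k hk
        have hkx : k ≠ x := by
          intro h; subst h
          exact hmem (by simpa [PySem.Set.mem_ofList] using hk)
        rw [hother k hkx]
      unfold pvWS
      rw [hS, hMF', ← hM]
      rw [List.map_append, List.sum_append, List.map_congr_left hSfx]
      simp only [List.map_cons, List.map_nil, List.sum_cons, List.sum_nil]
      rw [hcx, hc1]
      have hnlt : ¬ M < 1 := by omega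
      rw [if_neg hnlt]
      by_cases h2 : (1 : Int) = M
      · rw [if_pos h2, if_pos h2]; ring
      · rw [if_neg h2, if_neg h2]; ring

theorem pvAW_append (t : List Int) (x : Int) :
    pvAW (t ++ [x]) = pvAW t + pvWS (t ++ [x]) := by
  unfold pvAW
  rw [List.length_append, List.length_singleton, List.range_succ, List.map_append,
    List.sum_append]
  congr 1
  · congr 1
    apply List.map_congr_left
    intro k hk
    have hk' : k + 1 ≤ t.length := by
      have := List.mem_range.mp hk; omega
    rw [List.take_append_of_le_length hk']
  · have h : (t ++ [x]).take (t.length + 1) = t ++ [x] := List.take_of_length_le (by simp)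
    simp [h]

-- the counter after one more element
theorem pvCounter_append (t : List Int) (x : Int) :
    PySem.Dict.counter (t ++ [x])
      = (PySem.Dict.counter t).insert x ((PySem.Dict.counter t).getD x 0 + 1) := by
  rw [← PySem.Dict.foldl_insert_getD_add_one_eq_counter,
      ← PySem.Dict.foldl_insert_getD_add_one_eq_counter, List.foldl_append]
  simp

-- B's inner-loop invariant
theorem pvBinv (t : List Int) (R : Int) :
    t.foldl pvBstep (PySem.Dict.empty, 0, 0, R)
      = (PySem.Dict.counter t, pvMF t, pvWS t, R + pvAW t) := by
  induction t using List.reverseRecOn with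
  | nil => simp [pvMF, pvWS, pvAW]; rfl
  | append_singleton t x ih =>
    rw [List.foldl_append, List.foldl_cons, List.foldl_nil, ih]
    have hgd : (PySem.Dict.counter t).getD x 0 = pvCnt t x := PySem.Dict.getD_counter t x
    have hfreq := (pvCounter_append t x).symm
    rw [hgd] at hfreq
    have hMF := pvMF_append t x
    have hWS := pvWS_append t x
    have hAW := pvAW_append t x
    unfold pvBstep
    simp only [hgd]
    by_cases h1 : pvCnt t x + 1 > pvMF t
    · rw [if_pos h1]
      have hM' : pvMF (t ++ [x]) = pvCnt t x + 1 := by rw [hMF]; omega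
      have hW' : pvWS (t ++ [x]) = x * (pvCnt t x + 1) := by rw [hWS, if_pos (by omega)]
      rw [hfreq, hAW, hM', hW']
      congr 1; congr 1; congr 1
      ring
    · rw [if_neg h1]
      push_neg at h1
      have hM' : pvMF (t ++ [x]) = pvMF t := by rw [hMF]; omega
      by_cases h2 : pvCnt t x + 1 = pvMF t
      · rw [if_pos (by simpa using h2)]
        have hW' : pvWS (t ++ [x]) = pvWS t + x * (pvCnt t x + 1) := by
          rw [hWS, if_neg (by omega), if_pos h2]
        rw [hfreq, hAW, hM', hW']
        congr 1; congr 1; congr 1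
        ring
      · rw [if_neg (by simpa using h2)]
        have hW' : pvWS (t ++ [x]) = pvWS t := by
          rw [hWS, if_neg (by omega), if_neg h2]
        rw [hfreq, hAW, hM', hW']
        congr 1; congr 1; congr 1
        ring

-- A's per-subarray contribution is pvWS
theorem pvAw (sub : List Int) (hs : sub ≠ []) (R : Int) :
    (PySem.Dict.counter sub).items.foldl
      (fun res p => if p.2 ==
          (if (PySem.Dict.counter sub).size ≠ 0
            then (PySem.List.max? (PySem.Dict.counter sub).values (fun v => v)).getD 0 else 0)
        then res + p.1 * p.2 else res) R
      = R + pvWS sub := by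
  have hS : PySem.Set.ofList sub ≠ [] := by
    rcases List.exists_mem_of_ne_nil sub hs with ⟨a, ha⟩
    intro h
    have : a ∈ PySem.Set.ofList sub := by simpa [PySem.Set.mem_ofList] using ha
    simp [h] at this
  have hitems : (PySem.Dict.counter sub).items
      = (PySem.Set.ofList sub).map (fun k => (k, pvCnt sub k)) :=
    PySem.Dict.items_counter sub
  have hvalues : (PySem.Dict.counter sub).values
      = (PySem.Set.ofList sub).map (fun k => pvCnt sub k) := by
    show (PySem.Dict.counter sub).items.map (·.2) = _
    rw [hitems, List.map_map]
    rfl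
  have hsize : (PySem.Dict.counter sub).size ≠ 0 := by
    show (PySem.Dict.counter sub).items.length ≠ 0
    rw [hitems]
    simpa using hS
  -- the computed max is pvMF sub
  have hmax : (if (PySem.Dict.counter sub).size ≠ 0
      then (PySem.List.max? (PySem.Dict.counter sub).values (fun v => v)).getD 0 else 0)
      = pvMF sub := by
    rw [if_pos hsize, hvalues]
    rcases hE : PySem.Set.ofList sub with _ | ⟨k0, rest⟩
    · exact absurd hE hS
    · have hk0 : k0 ∈ sub := by
        have : k0 ∈ PySem.Set.ofList sub := by rw [hE]; exact List.mem_cons_self ..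
        simpa [PySem.Set.mem_ofList] using this
      rw [List.map_cons, PySem.List.max?_id_cons, Option.getD_some]
      unfold pvMF
      rw [hE, List.map_cons, List.foldl_cons,
        max_eq_right (pvCnt_nonneg sub k0)]
  rw [hmax, hitems, List.foldl_map]
  have hbody : ∀ (res : Int), ∀ k ∈ PySem.Set.ofList sub,
      (fun (res : Int) (p : Int × Int) => if p.2 == pvMF sub then res + p.1 * p.2 else res)
        res ((fun k => (k, pvCnt sub k)) k)
      = res + (if pvCnt sub k = pvMF sub then k * pvCnt sub k else 0) := by
    intro res k _
    simp only [beq_iff_eq]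
    split_ifs <;> simp
  calc (PySem.Set.ofList sub).foldl
        (fun res k => (fun (res : Int) (p : Int × Int) =>
          if p.2 == pvMF sub then res + p.1 * p.2 else res) res ((fun k => (k, pvCnt sub k)) k)) R
      = (PySem.Set.ofList sub).foldl
        (fun res k => res + (if pvCnt sub k = pvMF sub then k * pvCnt sub k else 0)) R := by
        apply PySem.List.foldl_congr_mem
        intro acc k hk
        exact hbody acc k hk
    _ = R + pvWS sub := by
        rw [PySem.List.foldl_add]
        rfl

-- A's inner loop over j sums pvWS of the prefixes of nums.drop i
theorem pvAside (nums : List Int) (i res : Int) (h0i : 0 ≤ i) :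
    (PySem.List.pyRange i (nums.length : Int) 1).foldl
      (fun res j =>
        (PySem.Dict.counter (PySem.List.slice nums (some i) (some (j + 1)))).items.foldl
          (fun res p => if p.2 ==
              (if (PySem.Dict.counter (PySem.List.slice nums (some i) (some (j + 1)))).size ≠ 0
                then (PySem.List.max? (PySem.Dict.counter
                  (PySem.List.slice nums (some i) (some (j + 1)))).values (fun v => v)).getD 0
                else 0)
            then res + p.1 * p.2 else res) res) res
      = res + pvAW (nums.drop i.toNat) := by
  rw [PySem.List.pyRange_one i (nums.length : Int), List.foldl_map]
  set t := nums.drop i.toNat with ht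
  have hN : ((nums.length : Int) - i).toNat = t.length := by
    rw [ht, List.length_drop]; omega
  rw [hN]
  refine Eq.trans (PySem.List.foldl_congr_mem _ _
    (fun res k => res + pvWS (t.take (k + 1))) res ?_) ?_
  · intro acc k hk
    have hkt : k < t.length := List.mem_range.mp hk
    beta_reduce
    have hsl : PySem.List.slice nums (some i) (some (i + (k : Int) + 1)) = t.take (k + 1) := by
      rw [PySem.List.slice_toNat nums h0i (by omega), ht]
      congr 1
      omega
    rw [hsl]
    exact pvAw (t.take (k + 1))
      (List.ne_nil_of_length_pos (by rw [List.length_take]; omega)) acc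
  · rw [PySem.List.foldl_add]
    rfl

-- B's inner loop, written on the element values
theorem pvBside (nums : List Int) (i res : Int) (h0i : 0 ≤ i) :
    ((PySem.List.pyRange i (nums.length : Int) 1).foldl
      (fun st j => pvBstep st (PySem.List.pyGetD nums j 0))
      ((PySem.Dict.empty, 0, 0, res) : PySem.Dict Int Int × Int × Int × Int)).2.2.2
      = res + pvAW (nums.drop i.toNat) := by
  rw [PySem.List.foldl_pyRange_pyGetD' nums 0 pvBstep _ h0i, pvBinv]

-- ===== VERDICT (by name: the statement is the Claim_ definition above) =====
theorem sumWeightedModes_spec : Claim_equal_sumWeightedModes := by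
  intro nums _
  unfold Spec_sumWeightedModes sumWeightedModes sumWeightedModes_alt
  refine PySem.List.foldl_congr_mem _ _ _ 0 ?_
  intro res i hi
  obtain ⟨h0i, hin⟩ := PySem.List.mem_pyRange_one.mp hi
  exact Eq.trans (pvAside nums i res h0i) (pvBside nums i res h0i).symm
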